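-- pv_equiv track=rewrite | github.com/blaisewang/leetcode | src/1063.有效子数组的数目.py | validSubarrays
-- ===== SOURCE A (Python) =====
-- from typing import List
--
-- def validSubarrays(nums: List[int]) -> int:
--     r = 0
--     s = [(-float("inf"), len(nums))]
--     for i in range(len(nums) - 1, -1, -1):
--         v = nums[i]
--         while v <= s[-1][0]:
--             s.pop()
--         r += s[-1][1] - i
--         s.append((v, i))
--
--     return r
-- ===== SOURCE B (Python) =====
-- from typing import List
--
-- def validSubarrays(nums: List[int]) -> int:
--     r = 0
--     for i in range(len(nums)):
--         j = i
--         while j < len(nums) and nums[j] >= nums[i]: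
--             j += 1
--         r += j - i
--     return r
-- ===== Notes on version B (the rewrite author's own statement) =====
-- stated objective: simpler
-- what changed: Replaced the backward monotonic-stack single pass by a plain nested-loop brute force that, for each start index, scans forward to the first strictly smaller element and adds the run length.
import Mathlib
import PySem

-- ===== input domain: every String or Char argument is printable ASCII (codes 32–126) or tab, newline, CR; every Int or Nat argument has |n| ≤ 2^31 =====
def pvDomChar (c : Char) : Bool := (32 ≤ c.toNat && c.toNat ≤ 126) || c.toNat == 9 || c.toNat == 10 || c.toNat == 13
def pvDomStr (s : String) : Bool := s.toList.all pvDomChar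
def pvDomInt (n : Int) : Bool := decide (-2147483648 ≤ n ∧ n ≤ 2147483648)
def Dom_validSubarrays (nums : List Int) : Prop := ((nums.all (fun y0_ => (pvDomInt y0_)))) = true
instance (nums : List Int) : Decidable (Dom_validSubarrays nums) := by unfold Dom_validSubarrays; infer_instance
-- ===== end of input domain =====

-- B replaces A's backward monotonic-stack pass by a plain nested forward scan: simpler, not faster.


-- ===== PORT A =====
-- the stack entry value is Option Int: `none` is Python's sentinel -inf (the comparison
-- `v <= -inf` is always False for an int v, exactly `leTop v none = false`)
def leTop (v : Int) : Option Int → Bool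
  | none => false
  | some w => v ≤ w

-- the `while v <= s[-1][0]: s.pop()` loop (stack top at the head)
def popWhile (v : Int) : List (Option Int × Int) → List (Option Int × Int)
  | [] => []
  | (w, j) :: rest => if leTop v w then popWhile v rest else (w, j) :: rest

-- one iteration of the `for i in range(len(nums)-1, -1, -1)` loop over the state (r, s)
def stepA (nums : List Int) (st : Int × List (Option Int × Int)) (i : Int) :
    Int × List (Option Int × Int) :=
  let v := (PySem.List.pyGet? nums i).getD 0   -- i is always in range here
  let s := popWhile v st.2
  (st.1 + ((s.headD (none, (nums.length : Int))).2 - i), (some v, i) :: s)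

def validSubarrays (nums : List Int) : Int :=
  ((PySem.List.pyRange ((nums.length : Int) - 1) (-1) (-1)).foldl (stepA nums)
    (0, [(none, (nums.length : Int))])).1

-- ===== PORT B =====
-- the inner `while j < len(nums) and nums[j] >= nums[i]` walk, as recursion over the suffix
def runLen (v : Int) : List Int → Int
  | [] => 0
  | x :: xs => if v ≤ x then 1 + runLen v xs else 0

def validSubarrays_alt (nums : List Int) : Int :=
  (List.range nums.length).foldl
    (fun r i => r + runLen (nums.getD i 0) (nums.drop i)) 0

-- ===== PRECONDITION & SPEC =====
def Spec_validSubarrays (nums : List Int) (out : Int) : Prop := out = validSubarrays_alt nums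
instance (nums : List Int) (out : Int) : Decidable (Spec_validSubarrays nums out) := by unfold Spec_validSubarrays; infer_instance

-- ===== CLAIM (what is proved, stated in full; the proofs are below) =====
def Claim_equal_validSubarrays : Prop := ∀ (nums : List Int), Dom_validSubarrays nums → Spec_validSubarrays nums (validSubarrays nums)

-- ===== LEMMAS AND PROOFS =====

-- the index list [m-1, …, 1, 0] that A's reversed range produces
def idxList : Nat → List Int
  | 0 => []
  | m + 1 => (m : Int) :: idxList m

lemma map_range_down (n : Nat) :
    (List.range n).map (fun k : Nat => ((n : Int) - 1) - (k : Int)) = idxList n := by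
  induction n with
  | zero => simp [idxList]
  | succ m ih =>
    rw [List.range_succ_eq_map, List.map_cons, List.map_map]
    simp only [idxList]
    refine congrArg₂ List.cons (by push_cast; ring) ?_
    rw [← ih]
    apply List.map_congr_left
    intro k _
    simp only [Function.comp_apply]
    push_cast; ring

lemma pyRange_down (n : Nat) :
    PySem.List.pyRange ((n : Int) - 1) (-1) (-1) = idxList n := by
  rw [← map_range_down n]
  simp only [PySem.List.pyRange]
  norm_num
  by_cases h : 0 < n
  · rw [if_pos h]
    apply List.map_congr_left
    intro k _
    ring
  · rw [if_neg h]
    have hn : n = 0 := by omega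
    subst hn
    simp

-- the stack invariant: after processing indices n-1 … m, popping with any threshold v
-- leaves on top the first index j ≥ m with nums[j] < v (or n), as an offset count
def Good (nums : List Int) (m : Nat) (s : List (Option Int × Int)) : Prop :=
  ∀ v : Int, ((popWhile v s).headD (none, (nums.length : Int))).2
      = (m : Int) + runLen v (nums.drop m)

lemma popWhile_popWhile {v v0 : Int} (h : v ≤ v0) (s : List (Option Int × Int)) :
    popWhile v (popWhile v0 s) = popWhile v s := by
  induction s with
  | nil => rfl
  | cons p rest ih =>
    obtain ⟨w, j⟩ := p
    by_cases h0 : leTop v0 w = true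
    · have hv : leTop v w = true := by
        cases w with
        | none => simp [leTop] at h0
        | some x => simp [leTop] at h0 ⊢; omega
      simp [popWhile, h0, hv, ih]
    · simp [popWhile, h0]

lemma good_step {nums : List Int} {m : Nat} {s : List (Option Int × Int)}
    (hm : m < nums.length) (hg : Good nums (m + 1) s) :
    Good nums m ((some (nums.getD m 0), (m : Int)) :: popWhile (nums.getD m 0) s) := by
  intro v
  set v0 := nums.getD m 0 with hv0
  have hdrop : nums.drop m = v0 :: nums.drop (m + 1) := by
    rw [List.drop_eq_getElem_cons hm, hv0, List.getD_eq_getElem?_getD,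
      List.getElem?_eq_getElem hm]
    rfl
  by_cases hle : v ≤ v0
  · have h1 : leTop v (some v0) = true := by simp [leTop, hle]
    rw [show popWhile v ((some v0, (m : Int)) :: popWhile v0 s)
        = popWhile v (popWhile v0 s) by simp [popWhile, h1]]
    rw [popWhile_popWhile hle, hg v, hdrop]
    simp [runLen, hle]
    ring
  · have h1 : leTop v (some v0) = false := by simp [leTop]; omega
    rw [show popWhile v ((some v0, (m : Int)) :: popWhile v0 s)
        = (some v0, (m : Int)) :: popWhile v0 s by simp [popWhile, h1]]
    rw [hdrop]
    simp [runLen, hle]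

lemma stepA_eq {nums : List Int} {m : Nat} {r : Int} {s : List (Option Int × Int)}
    (hm : m < nums.length) (hg : Good nums (m + 1) s) :
    stepA nums (r, s) (m : Int)
      = (r + runLen (nums.getD m 0) (nums.drop m),
         (some (nums.getD m 0), (m : Int)) :: popWhile (nums.getD m 0) s) := by
  have hv : (PySem.List.pyGet? nums (m : Int)).getD 0 = nums.getD m 0 := by
    rw [PySem.List.pyGet?_natCast, List.getD_eq_getElem?_getD]
  have hdrop : nums.drop m = nums.getD m 0 :: nums.drop (m + 1) := by
    rw [List.drop_eq_getElem_cons hm, List.getD_eq_getElem?_getD,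
      List.getElem?_eq_getElem hm]
    rfl
  have htop := hg (nums.getD m 0)
  simp only [stepA, hv]
  refine Prod.ext ?_ rfl
  simp only [htop, hdrop, runLen, le_refl, if_true]
  push_cast
  ring

lemma loop_eq (nums : List Int) (m : Nat) (hm : m ≤ nums.length) :
    ∀ (r : Int) (s : List (Option Int × Int)), Good nums m s →
      ((idxList m).foldl (stepA nums) (r, s)).1
        = r + ((List.range m).map (fun i => runLen (nums.getD i 0) (nums.drop i))).sum := by
  induction m with
  | zero => intro r s _; simp [idxList]
  | succ m ih =>
    intro r s hg
    have hm' : m < nums.length := by omega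
    rw [idxList, List.foldl_cons, stepA_eq hm' hg,
      ih (by omega) _ _ (good_step hm' hg), List.range_succ]
    simp
    ring

lemma good_init (nums : List Int) :
    Good nums nums.length [(none, (nums.length : Int))] := by
  intro v
  simp [popWhile, leTop, runLen, List.drop_length]

lemma alt_eq_sum (nums : List Int) :
    validSubarrays_alt nums
      = ((List.range nums.length).map
          (fun i => runLen (nums.getD i 0) (nums.drop i))).sum := by
  unfold validSubarrays_alt
  rw [PySem.List.foldl_add]
  simp

-- ===== VERDICT (by name: the statement is the Claim_ definition above) =====
theorem validSubarrays_spec : Claim_equal_validSubarrays := by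
  intro nums _
  unfold Spec_validSubarrays validSubarrays
  rw [pyRange_down nums.length,
    loop_eq nums nums.length le_rfl 0 _ (good_init nums), alt_eq_sum nums]
  ring
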